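-- pv_equiv track=rewrite | github.com/climbcat/struct_reflect | reflect.py | cogen_decode
-- ===== SOURCE A (Python) =====
-- def cogen_decode(obj, structname):
--
--     lines = [];
--     lines.append("%s decode_%s(string rjsons){" % (structname, structname.lower()))
--     lines.append("  %s pack;" % structname)
--
--     for key, value in obj.items():
--
--         if value == "int":
--             lines.append('  pack.%s = find_int("%s", rjsons);' % (key, key) )
--         elif value == "double":
--             lines.append('  pack.%s = find_double("%s", rjsons);' % (key, key) )
--         elif value == "string":
--             lines.append('  pack.%s = find_string("%s", rjsons);' % (key, key) )
--
--         elif value == "vector<double>":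
--             lines.append('  pack.%s = find_double_array("%s", rjsons);' % (key, key) )
--         elif value == "vector<int>":
--             lines.append('  pack.%s = find_int_array("%s", rjsons);' % (key, key) )
--         elif value == "vector<string>":
--             lines.append('  pack.%s = find_string_array("%s", rjsons);' % (key, key) )
--
--     lines.append("  return pack;")
--     lines.append("}")
--
--     return "\n".join(lines)
-- ===== SOURCE B (Python) =====
-- def cogen_decode(obj, structname):
--     # Derive the finder name from the type string itself: "vector<X>" -> find_X_array,
--     # scalar X -> find_X, emitting a line only when X is int/double/string.
--     body = ""
--     for key, value in obj.items():
--         if value.startswith("vector<") and value.endswith(">"):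
--             base, suffix = value[7:-1], "_array"
--         else:
--             base, suffix = value, ""
--         if base in ("int", "double", "string"):
--             body += '  pack.%s = find_%s%s("%s", rjsons);\n' % (key, base, suffix, key)
--     return "%s decode_%s(string rjsons){\n  %s pack;\n%s  return pack;\n}" % (
--         structname, structname.lower(), structname, body)
-- ===== Notes on version B (the rewrite author's own statement) =====
-- stated objective: alternative
-- what changed: Instead of dispatching on six literal type strings, B parses the type string itself (strip a vector<...> wrapper, remember an _array suffix, test the base against int/double/string) and synthesizes the finder name as find_<base><suffix>, accumulating the body as one string spliced into a single format template rather than a lines list joined by newline.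
import Mathlib
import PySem

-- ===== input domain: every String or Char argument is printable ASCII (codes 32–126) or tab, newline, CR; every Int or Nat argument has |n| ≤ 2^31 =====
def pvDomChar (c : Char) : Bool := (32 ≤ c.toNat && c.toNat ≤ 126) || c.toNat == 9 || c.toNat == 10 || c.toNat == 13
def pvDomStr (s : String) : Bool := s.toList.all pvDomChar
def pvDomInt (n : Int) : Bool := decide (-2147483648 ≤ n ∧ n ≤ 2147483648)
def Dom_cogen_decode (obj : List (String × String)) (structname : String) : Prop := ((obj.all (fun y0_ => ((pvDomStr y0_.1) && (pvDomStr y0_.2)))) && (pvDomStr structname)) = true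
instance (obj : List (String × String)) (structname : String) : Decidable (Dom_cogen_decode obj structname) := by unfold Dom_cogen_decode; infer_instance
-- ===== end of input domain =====

-- B parses the type string (strip a vector<...> wrapper, remember an _array suffix, test the
-- base against int/double/string) and synthesizes the finder name find_<base><suffix>, instead
-- of A's six-arm dispatch on literal type strings; same cost (alternative).

-- ===== PORT A =====
-- the body of A's for-loop: the six-arm if/elif chain appending to lines
def pvStepA (lines : List String) (kv : String × String) : List String :=
  let key := kv.1
  let value := kv.2
  if value == "int" then lines ++ ["  pack." ++ key ++ " = find_int(\"" ++ key ++ "\", rjsons);"]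
  else if value == "double" then lines ++ ["  pack." ++ key ++ " = find_double(\"" ++ key ++ "\", rjsons);"]
  else if value == "string" then lines ++ ["  pack." ++ key ++ " = find_string(\"" ++ key ++ "\", rjsons);"]
  else if value == "vector<double>" then lines ++ ["  pack." ++ key ++ " = find_double_array(\"" ++ key ++ "\", rjsons);"]
  else if value == "vector<int>" then lines ++ ["  pack." ++ key ++ " = find_int_array(\"" ++ key ++ "\", rjsons);"]
  else if value == "vector<string>" then lines ++ ["  pack." ++ key ++ " = find_string_array(\"" ++ key ++ "\", rjsons);"]
  else lines

-- literal transliteration of A: a lines list, a fold over obj with the if/elif chain, "\n".join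
def cogen_decode (obj : List (String × String)) (structname : String) : String :=
  let lines : List String := []
  let lines := lines ++ [structname ++ " decode_" ++ PySem.Str.lower structname ++ "(string rjsons){"]
  let lines := lines ++ ["  " ++ structname ++ " pack;"]
  let lines := obj.foldl pvStepA lines
  let lines := lines ++ ["  return pack;"]
  let lines := lines ++ ["}"]
  PySem.Str.join "\n" lines

-- ===== PORT B =====
-- the body of Source B's for-loop: parse the type string, then emit if the base is a known scalar
def pvStepB (body : String) (kv : String × String) : String :=
  let key := kv.1
  let value := kv.2
  let bs : String × String :=
    if PySem.Str.startswith value "vector<" && PySem.Str.endswith value ">"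
    then (PySem.Str.slice value (some 7) (some (-1)), "_array")
    else (value, "")
  if bs.1 == "int" || bs.1 == "double" || bs.1 == "string"
  then body ++ "  pack." ++ key ++ " = find_" ++ bs.1 ++ bs.2 ++ "(\"" ++ key ++ "\", rjsons);\n"
  else body

-- literal transliteration of Source B: accumulate body, splice into a single format template
def cogen_decode_alt (obj : List (String × String)) (structname : String) : String :=
  let body := obj.foldl pvStepB ""
  structname ++ " decode_" ++ PySem.Str.lower structname ++ "(string rjsons){\n  " ++
    structname ++ " pack;\n" ++ body ++ "  return pack;\n}"

-- ===== PRECONDITION & SPEC =====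
def Spec_cogen_decode (obj : List (String × String)) (structname : String) (out : String) : Prop := out = cogen_decode_alt obj structname
instance (obj : List (String × String)) (structname : String) (out : String) : Decidable (Spec_cogen_decode obj structname out) := by unfold Spec_cogen_decode; infer_instance

-- ===== CLAIM (what is proved, stated in full; the proofs are below) =====
def Claim_equal_cogen_decode : Prop := ∀ (obj : List (String × String)) (structname : String), Dom_cogen_decode obj structname → Spec_cogen_decode obj structname (cogen_decode obj structname)

-- ===== LEMMAS AND PROOFS =====

-- the body line both programs emit for a key and its finder name (B adds the newline itself)
def pvLine (key f : String) : String := "  pack." ++ key ++ " = " ++ f ++ "(\"" ++ key ++ "\", rjsons);"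

-- proof-only canonical finder: the six recognized type strings and their finder names
def pvFind (value : String) : Option String :=
  if value == "int" then some "find_int"
  else if value == "double" then some "find_double"
  else if value == "string" then some "find_string"
  else if value == "vector<double>" then some "find_double_array"
  else if value == "vector<int>" then some "find_int_array"
  else if value == "vector<string>" then some "find_string_array"
  else none

-- A's if/elif chain is the canonical finder
theorem pvStepA_eq (lines : List String) (kv : String × String) :
    pvStepA lines kv = lines ++ ((pvFind kv.2).map (pvLine kv.1)).toList := by
  unfold pvStepA pvFind
  split_ifs <;> simp_all <;> (apply String.toList_inj.mp; simp [pvLine])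

-- a string that starts with "vector<" and ends with ">" is "vector<" ++ value[7:-1] ++ ">"
theorem pvVec_decomp (value : String)
    (h1 : PySem.Str.startswith value "vector<" = true)
    (h2 : PySem.Str.endswith value ">" = true) :
    value = "vector<" ++ PySem.Str.slice value (some 7) (some (-1)) ++ ">" := by
  have hp : "vector<".toList <+: value.toList :=
    (PySem.Chars.startswith_iff _ _).mp (by simpa using h1)
  have hs : ['>'] <:+ value.toList :=
    (PySem.Chars.endswith_iff _ _).mp (by simpa using h2)
  obtain ⟨t, ht⟩ := hp
  apply String.toList_inj.mp
  simp only [String.toList_append, PySem.Str.toList_slice, PySem.Chars.slice_eq_listSlice]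
  rw [← ht]
  have hslice : PySem.List.slice ("vector<".toList ++ t) (some 7) (some (-1)) = t.dropLast := by
    simp [PySem.List.slice, List.dropLast_eq_take]
  rw [hslice]
  -- t ≠ [] and t.getLast = '>'
  have htne : t ≠ [] := by
    rintro rfl
    rw [← ht] at hs
    obtain ⟨p, hpq⟩ := hs
    have := congrArg List.getLast? hpq
    simp at this
  obtain ⟨p, hpq⟩ := hs
  rw [← ht] at hpq
  have hlast : t.getLast htne = '>' := by
    have h2' : t.getLast? = some '>' := by
      have hc := congrArg List.getLast? hpq
      cases t with
      | nil => exact absurd rfl htne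
      | cons a t' => simpa using hc.symm
    have h1 := List.getLast?_eq_some_getLast htne
    rw [h1] at h2'
    exact Option.some.inj h2'
  calc "vector<".toList ++ t
      = "vector<".toList ++ (t.dropLast ++ [t.getLast htne]) := by rw [List.dropLast_append_getLast]
    _ = "vector<".toList ++ t.dropLast ++ ['>'] := by rw [hlast, List.append_assoc]

-- B's loop body emits the canonical finder's line (with newline) or nothing
theorem pvStepB_eq (body : String) (kv : String × String) :
    pvStepB body kv = (pvFind kv.2).elim body (fun f => body ++ (pvLine kv.1 f ++ "\n")) := by
  obtain ⟨key, value⟩ := kv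
  by_cases e1 : value = "int"
  · subst e1
    unfold pvStepB
    dsimp only
    rw [show (if PySem.Str.startswith "int" "vector<" && PySem.Str.endswith "int" ">" then (PySem.Str.slice "int" (some 7) (some (-1)), "_array") else (("int":String), ("":String))) = (("int":String),("":String)) from by decide]
    simp [pvFind]
    apply String.toList_inj.mp; simp [pvLine]
  by_cases e2 : value = "double"
  · subst e2
    unfold pvStepB
    dsimp only
    rw [show (if PySem.Str.startswith "double" "vector<" && PySem.Str.endswith "double" ">" then (PySem.Str.slice "double" (some 7) (some (-1)), "_array") else (("double":String), ("":String))) = (("double":String),("":String)) from by decide]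
    simp [pvFind]
    apply String.toList_inj.mp; simp [pvLine]
  by_cases e3 : value = "string"
  · subst e3
    unfold pvStepB
    dsimp only
    rw [show (if PySem.Str.startswith "string" "vector<" && PySem.Str.endswith "string" ">" then (PySem.Str.slice "string" (some 7) (some (-1)), "_array") else (("string":String), ("":String))) = (("string":String),("":String)) from by decide]
    simp [pvFind]
    apply String.toList_inj.mp; simp [pvLine]
  by_cases e4 : value = "vector<double>"
  · subst e4
    unfold pvStepB
    dsimp only
    rw [show (if PySem.Str.startswith "vector<double>" "vector<" && PySem.Str.endswith "vector<double>" ">" then (PySem.Str.slice "vector<double>" (some 7) (some (-1)), "_array") else (("vector<double>":String), ("":String))) = (("double":String),("_array":String)) from by decide]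
    simp [pvFind]
    apply String.toList_inj.mp; simp [pvLine]
  by_cases e5 : value = "vector<int>"
  · subst e5
    unfold pvStepB
    dsimp only
    rw [show (if PySem.Str.startswith "vector<int>" "vector<" && PySem.Str.endswith "vector<int>" ">" then (PySem.Str.slice "vector<int>" (some 7) (some (-1)), "_array") else (("vector<int>":String), ("":String))) = (("int":String),("_array":String)) from by decide]
    simp [pvFind]
    apply String.toList_inj.mp; simp [pvLine]
  by_cases e6 : value = "vector<string>"
  · subst e6
    unfold pvStepB
    dsimp only
    rw [show (if PySem.Str.startswith "vector<string>" "vector<" && PySem.Str.endswith "vector<string>" ">" then (PySem.Str.slice "vector<string>" (some 7) (some (-1)), "_array") else (("vector<string>":String), ("":String))) = (("string":String),("_array":String)) from by decide]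
    simp [pvFind]
    apply String.toList_inj.mp; simp [pvLine]
  · have hf : pvFind value = none := by simp [pvFind, e1, e2, e3, e4, e5, e6]
    rw [hf]
    simp only [Option.elim]
    unfold pvStepB
    dsimp only
    by_cases hv : (PySem.Str.startswith value "vector<" && PySem.Str.endswith value ">") = true
    · rcases (Bool.and_eq_true _ _).mp hv with ⟨ha, hb⟩
      have hd := pvVec_decomp value ha hb
      rw [if_pos hv]
      have hs1 : PySem.Str.slice value (some 7) (some (-1)) ≠ "int" := by
        intro h; apply e5; rw [hd, h]; decide
      have hs2 : PySem.Str.slice value (some 7) (some (-1)) ≠ "double" := by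
        intro h; apply e4; rw [hd, h]; decide
      have hs3 : PySem.Str.slice value (some 7) (some (-1)) ≠ "string" := by
        intro h; apply e6; rw [hd, h]; decide
      simp [hs1, hs2, hs3]
    · rw [if_neg hv]
      simp [e1, e2, e3]

-- A's loop appends exactly the filterMap of the canonical finder
theorem pvFoldA_eq (obj : List (String × String)) (lines : List String) :
    obj.foldl pvStepA lines
      = lines ++ obj.filterMap (fun kv => (pvFind kv.2).map (pvLine kv.1)) := by
  induction obj generalizing lines with
  | nil => simp
  | cons kv rest ih =>
      rw [List.foldl_cons, pvStepA_eq, ih, List.filterMap_cons]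
      cases pvFind kv.2 <;> simp

-- B's loop concatenates those same lines, each followed by a newline
theorem pvFoldB_toList (obj : List (String × String)) (acc : String) :
    (obj.foldl pvStepB acc).toList
      = acc.toList ++ (obj.filterMap (fun kv => (pvFind kv.2).map (pvLine kv.1))).flatMap
          (fun m => m.toList ++ ['\n']) := by
  induction obj generalizing acc with
  | nil => simp
  | cons kv rest ih =>
      rw [List.foldl_cons, pvStepB_eq, List.filterMap_cons]
      cases pvFind kv.2 with
      | none => simpa using ih acc
      | some f => simp [ih, List.append_assoc]

-- "\n".join over header/body/footer lines, on the List Char side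
theorem pvJoinNl (L : List (List Char)) (t1 t2 : List Char) :
    PySem.Chars.join ['\n'] (L ++ [t1, t2]) = L.flatMap (fun m => m ++ ['\n']) ++ t1 ++ '\n' :: t2 := by
  induction L with
  | nil => simp [PySem.Chars.join_cons_cons, PySem.Chars.join_singleton]
  | cons m L ih =>
      cases L with
      | nil => simp_all [PySem.Chars.join_cons_cons]
      | cons a L' => simp_all [PySem.Chars.join_cons_cons]

-- ===== VERDICT (by name: the statement is the Claim_ definition above) =====
theorem cogen_decode_spec : Claim_equal_cogen_decode := by
  intro obj structname hdom
  show cogen_decode obj structname = cogen_decode_alt obj structname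
  unfold cogen_decode cogen_decode_alt
  dsimp only
  rw [List.nil_append, pvFoldA_eq]
  apply String.toList_inj.mp
  simp only [PySem.Str.toList_join, String.toList_append, List.map_append, List.map_cons,
    List.map_nil, List.cons_append, List.nil_append, List.append_assoc]
  rw [show ("\n" : String).toList = ['\n'] from rfl]
  have hj := pvJoinNl ((structname ++ " decode_" ++ PySem.Str.lower structname ++
      "(string rjsons){").toList ::
    ("  " ++ structname ++ " pack;").toList ::
    (List.filterMap (fun kv => Option.map (pvLine kv.1) (pvFind kv.2)) obj).map
      String.toList)
    "  return pack;".toList "}".toList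
  simp only [String.toList_append, List.cons_append, List.append_assoc] at hj
  rw [hj, pvFoldB_toList]
  clear hj hdom
  rw [show ("(string rjsons){\n  " : String).toList
        = "(string rjsons){".toList ++ '\n' :: "  ".toList from by decide,
     show (" pack;\n" : String).toList = " pack;".toList ++ ['\n'] from by decide,
     show ("  return pack;\n}" : String).toList
        = "  return pack;".toList ++ '\n' :: "}".toList from by decide]
  simp [List.flatMap_cons, List.flatMap_map, List.append_assoc]
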